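-- pv_equiv track=rewrite | github.com/Micah-Ribbens/Test-Writer | logic/function_finder.py | get_function_name
-- ===== SOURCE A (Python) =====
-- def get_function_name(function_declaration_line):
--     """ summary: finds the function's name
--
--         params:
--             function_declaration_line: String; the line that declares the function
--
--         returns: String; the name of the function
--     """
--
--     function_name = ""
--     for ch in function_declaration_line:
--         # There can't be any spaces in the function name meaning if there is a space then its not the function name
--         if ch == " ":
--             function_name = ""
--
--         elif ch == "(":
--             break
--
--         # If the ch isn't equal to '(' or a space then the function_name should have a ch added to it
--         else:
--             function_name += ch
--
--     return function_name
-- ===== SOURCE B (Python) =====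
-- def get_function_name(function_declaration_line):
--     before = function_declaration_line.split('(')[0]
--     return before.split(' ')[-1]
-- ===== Notes on version B (the rewrite author's own statement) =====
-- stated objective: simpler
-- what changed: Replaces the character-by-character accumulate/reset/break loop with a prefix-then-split decomposition: take the text before the first open paren via split('(')[0], then return the last single-space-delimited token via split(' ')[-1].
import Mathlib
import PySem

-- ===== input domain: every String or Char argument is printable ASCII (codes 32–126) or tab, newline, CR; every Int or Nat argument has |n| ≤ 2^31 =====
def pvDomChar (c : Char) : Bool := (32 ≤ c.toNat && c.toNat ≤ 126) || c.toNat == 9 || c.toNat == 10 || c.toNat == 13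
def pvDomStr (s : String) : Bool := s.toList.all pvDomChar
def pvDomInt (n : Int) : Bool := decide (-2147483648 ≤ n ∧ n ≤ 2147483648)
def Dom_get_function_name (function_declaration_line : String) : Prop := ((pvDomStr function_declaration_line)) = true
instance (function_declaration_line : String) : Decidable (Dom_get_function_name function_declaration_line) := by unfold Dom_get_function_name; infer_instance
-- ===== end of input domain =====

-- B replaces A's char-by-char accumulate/reset/break loop with two library splits: split('(')[0] then split(' ')[-1]; objective: simpler.

-- ===== PORT A =====
-- the for-loop: accumulate chars, reset on ' ', break on '(' (acc kept as List Char; final String.ofList)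
def getFnLoop : List Char → List Char → List Char
  | [], acc => acc
  | c :: rest, acc =>
      if c = ' ' then getFnLoop rest []
      else if c = '(' then acc
      else getFnLoop rest (acc ++ [c])

def get_function_name (function_declaration_line : String) : String :=
  String.ofList (getFnLoop function_declaration_line.toList [])

-- ===== PORT B =====
def get_function_name_alt (function_declaration_line : String) : String :=
  let before := ((PySem.Str.split? function_declaration_line "(").getD []).headD ""
  ((PySem.Str.split? before " ").getD []).getLastD ""

-- ===== PRECONDITION & SPEC =====
def Spec_get_function_name (function_declaration_line : String) (out : String) : Prop := out = get_function_name_alt function_declaration_line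
instance (function_declaration_line : String) (out : String) : Decidable (Spec_get_function_name function_declaration_line out) := by unfold Spec_get_function_name; infer_instance

-- ===== CLAIM (what is proved, stated in full; the proofs are below) =====
def Claim_equal_get_function_name : Prop := ∀ (function_declaration_line : String), Dom_get_function_name function_declaration_line → Spec_get_function_name function_declaration_line (get_function_name function_declaration_line)

-- ===== LEMMAS AND PROOFS =====

-- split on a single character, structural recursion (proof-side model of Chars.splitOn)
def splitC (d : Char) : List Char → List (List Char)
  | [] => [[]]
  | c :: rest =>
      if c = d then [] :: splitC d rest
      else
        match splitC d rest with
        | p :: ps => (c :: p) :: ps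
        | [] => [[c]]

theorem splitC_ne_nil (d : Char) (l : List Char) : splitC d l ≠ [] := by
  cases l with
  | nil => simp [splitC]
  | cons c rest =>
    simp only [splitC]
    split
    · simp
    · split <;> simp_all

theorem modifyHead_self {α : Type} (l : List α) : l.modifyHead (fun x => x) = l := by
  cases l <;> simp

theorem go_single (d : Char) (l : List Char) : ∀ (fuel : Nat) (cur : List Char) (acc : List (List Char)),
    l.length < fuel →
    PySem.Chars.splitOn.go [d] fuel l cur acc
      = acc.reverse ++ (splitC d l).modifyHead (cur.reverse ++ ·) := by
  induction l with
  | nil =>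
    intro fuel cur acc h
    cases fuel with
    | zero => omega
    | succ n => simp [PySem.Chars.splitOn.go, splitC]
  | cons c rest ih =>
    intro fuel cur acc h
    cases fuel with
    | zero => simp at h
    | succ n =>
      rw [PySem.Chars.splitOn.go]
      by_cases hc : c = d
      · subst hc
        have hpre : List.isPrefixOf [c] (c :: rest) = true := by
          simp [List.isPrefixOf]
        rw [if_pos hpre]
        simp only [List.length_cons] at h
        simp only [List.length_singleton, List.drop_succ_cons, List.drop_zero]
        rw [ih n [] (cur.reverse :: acc) (by omega)]
        simp [splitC, modifyHead_self]
      · have hpre2 : List.isPrefixOf [d] (c :: rest) = false := by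
          simp [List.isPrefixOf]
          exact fun hh => absurd hh.symm hc
        rw [if_neg (by simp [hpre2])]
        simp only [List.length_cons] at h
        rw [ih n (c :: cur) acc (by omega)]
        simp only [splitC, if_neg hc]
        rcases hsp : splitC d rest with _ | ⟨p, ps⟩
        · exact absurd hsp (splitC_ne_nil d rest)
        · simp

theorem splitOn_single (d : Char) (l : List Char) :
    PySem.Chars.splitOn l [d] = splitC d l := by
  unfold PySem.Chars.splitOn
  rw [go_single d l (l.length + 1) [] [] (by omega)]
  simp [modifyHead_self]

theorem splitC_head (d : Char) (l : List Char) :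
    (splitC d l).headD [] = l.takeWhile (· ≠ d) := by
  induction l with
  | nil => simp [splitC]
  | cons c rest ih =>
    simp only [splitC]
    by_cases hc : c = d
    · subst hc; simp [List.takeWhile]
    · rw [if_neg hc]
      rcases hsp : splitC d rest with _ | ⟨p, ps⟩
      · exact absurd hsp (splitC_ne_nil d rest)
      · simp only [List.headD_cons]
        rw [List.takeWhile_cons, if_pos (by simpa using hc)]
        have := ih
        rw [hsp] at this
        simp at this
        simp [this]

-- the loop equals: getLast of splitC ' ' of the prefix before '(' (with acc prepended to the head)
theorem loop_eq (t : List Char) : ∀ (acc : List Char),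
    getFnLoop t acc
      = ((splitC ' ' (t.takeWhile (· ≠ '('))).modifyHead (acc ++ ·)).getLastD [] := by
  induction t with
  | nil => intro acc; simp [getFnLoop, splitC]
  | cons c rest ih =>
    intro acc
    simp only [getFnLoop]
    by_cases hsp : c = ' '
    · subst hsp
      rw [if_pos rfl]
      rw [List.takeWhile_cons, if_pos (by decide)]
      simp only [splitC]
      rw [ih []]
      simp only [List.nil_append]
      rcases hq : splitC ' ' (rest.takeWhile (· ≠ '(')) with _ | ⟨p, ps⟩
      · exact absurd hq (splitC_ne_nil _ _)
      · simp
    · rw [if_neg hsp]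
      by_cases hp : c = '('
      · subst hp
        rw [if_pos rfl]
        simp [splitC]
      · rw [if_neg hp]
        rw [List.takeWhile_cons, if_pos (by simpa using hp)]
        simp only [splitC, if_neg hsp]
        rcases hq : splitC ' ' (rest.takeWhile (· ≠ '(')) with _ | ⟨p, ps⟩
        · exact absurd hq (splitC_ne_nil _ _)
        · rw [ih (acc ++ [c])]
          rw [hq]
          simp

-- ===== VERDICT (by name: the statement is the Claim_ definition above) =====
theorem get_function_name_spec : Claim_equal_get_function_name := by
  intro s _
  unfold Spec_get_function_name get_function_name get_function_name_alt
  simp only [PySem.Str.split?, PySem.Chars.split?]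
  have h1 : "(".toList = ['('] := rfl
  have h2 : " ".toList = [' '] := rfl
  norm_num [h1, h2]
  rw [splitOn_single '(' s.toList]
  rw [← List.headD_eq_head?_getD, ← List.getLastD_eq_getLast?]
  rw [splitC_head]
  rw [splitOn_single ' ' _]
  rw [loop_eq s.toList []]
  congr 1
  simp [modifyHead_self]
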